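-- pv_equiv track=rewrite | github.com/joshanashakya/dissertation | workspace/dataset/java-python/GeeksForGeeks/328/A/2.py | CountSubSet
-- ===== SOURCE A (Python) =====
-- def calculatePower(b, e) :
--
--     # Initially initialize answer to 1
--     ans = 1;
--
--     while (e > 0) :
--
--         # If e is odd,
--         # multiply b with answer
--         if (e % 2 == 1) :
--             ans = ans * b;
--
--         e = e // 2;
--         b = b * b;
--
--     return ans;
--
-- def CountSubSet(arr, n, X) :
--
--     count = 0; checkX = 0;
--
--     # Check if X is present in
--     # given subset or not
--     for i in range(n) :
--
--         if (arr[i] == X) :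
--             checkX = 1;
--             break;
--
--     # If X is present in set
--     # then calculate 2^(n-1) as count
--     if (checkX == 1) :
--         count = calculatePower(2, n - 1);
--
--     # if X is not present in a given set
--     else :
--         count = 0;
--
--     return count;
-- ===== SOURCE B (Python) =====
-- def CountSubSet(arr, n, X):
--     return (1 << (n - 1)) if n > 0 and X in arr[:n] else 0
-- ===== Notes on version B (the rewrite author's own statement) =====
-- stated objective: simpler
-- what changed: Replaced the index loop with break plus the binary-exponentiation helper by a one-line slice membership test and a closed-form shift 1 << (n-1).
import Mathlib
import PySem

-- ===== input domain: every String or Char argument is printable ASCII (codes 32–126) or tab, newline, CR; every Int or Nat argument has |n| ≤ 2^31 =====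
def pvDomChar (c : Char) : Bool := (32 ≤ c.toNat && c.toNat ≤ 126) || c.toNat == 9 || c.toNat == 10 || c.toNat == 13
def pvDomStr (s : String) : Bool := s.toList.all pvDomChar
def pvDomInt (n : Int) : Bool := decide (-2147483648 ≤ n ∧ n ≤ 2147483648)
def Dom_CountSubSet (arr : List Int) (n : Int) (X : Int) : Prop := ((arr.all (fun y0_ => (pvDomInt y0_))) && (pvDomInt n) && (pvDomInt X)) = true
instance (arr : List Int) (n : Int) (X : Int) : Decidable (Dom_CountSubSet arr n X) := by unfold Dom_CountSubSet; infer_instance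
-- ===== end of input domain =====

-- B replaces A's index loop with break and its binary-exponentiation helper by a
-- one-line slice membership test and the closed-form shift 1 << (n-1) (objective: simpler).

-- ===== PORT A =====
-- calculatePower's while loop: state (b, e, ans), e strictly decreases while 0 < e
def calcPowLoop (b e ans : Int) : Int :=
  if 0 < e then
    calcPowLoop (b * b) (PySem.Int.floordiv e 2)
      (if PySem.Int.mod e 2 = 1 then ans * b else ans)
  else ans
termination_by e.toNat
decreasing_by
  rw [PySem.Int.floordiv_eq_ediv_of_pos (by omega)]
  omega

def calculatePower (b e : Int) : Int := calcPowLoop b e 1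

-- A's for-loop over range(n) with break: scan the index list, stop at first hit
def scanX (arr : List Int) (X : Int) : List Int → Bool
  | [] => false
  | i :: rest => if PySem.List.pyGetD arr i 0 = X then true else scanX arr X rest

def CountSubSet (arr : List Int) (n : Int) (X : Int) : Int :=
  if scanX arr X (PySem.List.pyRange 0 n 1) then calculatePower 2 (n - 1) else 0

-- ===== PORT B =====
def CountSubSet_alt (arr : List Int) (n : Int) (X : Int) : Int :=
  if 0 < n ∧ X ∈ PySem.List.slice arr none (some n) then (1 : Int) <<< (n - 1).toNat else 0

-- ===== PRECONDITION & SPEC =====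
-- A raises IndexError iff n > len(arr) and X does not occur in arr (the loop reads arr[len(arr)]);
-- Pre_ excludes exactly those inputs and nothing on which A returns.
def Pre_CountSubSet (arr : List Int) (n : Int) (X : Int) : Prop :=
  n ≤ arr.length ∨ X ∈ arr
instance (arr : List Int) (n : Int) (X : Int) : Decidable (Pre_CountSubSet arr n X) := by
  unfold Pre_CountSubSet; infer_instance

def pvWitness_CountSubSet : List Int × Int × Int := ([1, 2, 3], 3, 2)

def Spec_CountSubSet (arr : List Int) (n : Int) (X : Int) (out : Int) : Prop := out = CountSubSet_alt arr n X
instance (arr : List Int) (n : Int) (X : Int) (out : Int) : Decidable (Spec_CountSubSet arr n X out) := by unfold Spec_CountSubSet; infer_instance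

-- ===== CLAIM (what is proved, stated in full; the proofs are below) =====
def Claim_equal_CountSubSet : Prop := ∀ (arr : List Int) (n : Int) (X : Int), Dom_CountSubSet arr n X → Pre_CountSubSet arr n X → Spec_CountSubSet arr n X (CountSubSet arr n X)

-- ===== LEMMAS AND PROOFS =====

-- binary exponentiation computes ans * b^e
theorem calcPowLoop_eq (b e ans : Int) (he : 0 ≤ e) :
    calcPowLoop b e ans = ans * b ^ e.toNat := by
  generalize hm : e.toNat = m
  induction m using Nat.strong_induction_on generalizing b e ans with
  | _ m ih =>
    rw [calcPowLoop]
    split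
    · rename_i hpos
      rw [PySem.Int.floordiv_eq_ediv_of_pos (by omega),
          PySem.Int.mod_eq_emod_of_pos (by omega)]
      rw [ih (e / 2).toNat (by omega) (b * b) (e / 2) _ (by omega) rfl]
      have h2 : m = 2 * (e / 2).toNat + (e % 2).toNat := by omega
      rw [h2, pow_add, pow_mul]
      have : b * b = b ^ 2 := by ring
      rcases Int.emod_two_eq_zero_or_one e with h | h
      · simp [h, this]
      · simp [h, this]; ring
    · rename_i hpos
      have : m = 0 := by omega
      simp [this]

-- scanX is List.any of the hit test
theorem scanX_eq_any (arr : List Int) (X : Int) (l : List Int) :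
    scanX arr X l = l.any (fun i => PySem.List.pyGetD arr i 0 = X) := by
  induction l with
  | nil => rfl
  | cons i rest ih =>
    rw [scanX]
    by_cases h : PySem.List.pyGetD arr i 0 = X <;> simp [h, ih]

theorem mem_take_iff (arr : List Int) (X : Int) (m : Nat) :
    X ∈ arr.take m ↔ ∃ j : Nat, j < m ∧ ∃ h : j < arr.length, arr[j] = X := by
  constructor
  · intro hmem
    obtain ⟨j, hj, hget⟩ := List.mem_iff_getElem.1 hmem
    have hjm : j < m := lt_of_lt_of_le hj (by simp [List.length_take])
    have hjl : j < arr.length := lt_of_lt_of_le hj (by simp [List.length_take])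
    rw [List.getElem_take] at hget
    exact ⟨j, hjm, hjl, hget⟩
  · rintro ⟨j, hjm, hjl, hget⟩
    exact List.mem_iff_getElem.2 ⟨j, by simp [List.length_take]; omega,
      by rw [List.getElem_take]; exact hget⟩

-- the loop condition equals B's membership test, under Pre_
theorem scan_iff (arr : List Int) (n X : Int)
    (hpre : n ≤ arr.length ∨ X ∈ arr) (hn : 0 ≤ n) :
    scanX arr X (PySem.List.pyRange 0 n 1) = true ↔ X ∈ arr.take n.toNat := by
  rw [scanX_eq_any, List.any_eq_true]
  constructor
  · rintro ⟨i, hi, hhit⟩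
    rw [PySem.List.mem_pyRange_one] at hi
    simp only [decide_eq_true_eq] at hhit
    rcases hpre with hlen | hmem
    · have hil : i < arr.length := by omega
      rw [PySem.List.pyGetD_eq_getElem arr 0 hi.1 (by omega)] at hhit
      exact (mem_take_iff arr X n.toNat).2 ⟨i.toNat, by omega, by omega, hhit⟩
    · by_cases hil : i < arr.length
      · rw [PySem.List.pyGetD_eq_getElem arr 0 hi.1 (by omega)] at hhit
        exact (mem_take_iff arr X n.toNat).2 ⟨i.toNat, by omega, by omega, hhit⟩
      · -- i out of range: X ∈ arr and take n.toNat is all of arr since n > length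
        have : arr.length ≤ n := by omega
        rw [List.take_of_length_le (by omega)]
        exact hmem
  · intro hmem
    obtain ⟨j, hjm, hjl, hget⟩ := (mem_take_iff arr X n.toNat).1 hmem
    refine ⟨(j : Int), ?_, ?_⟩
    · rw [PySem.List.mem_pyRange_one]; omega
    · simp only [decide_eq_true_eq]
      rw [PySem.List.pyGetD_eq_getElem arr 0 (by omega) (by exact_mod_cast hjl)]
      simpa using hget

-- ===== VERDICT (by name: the statement is the Claim_ definition above) =====
theorem CountSubSet_spec : Claim_equal_CountSubSet := by
  intro arr n X _ hpre
  unfold Spec_CountSubSet CountSubSet CountSubSet_alt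
  by_cases hn : 0 < n
  · have hslice : PySem.List.slice arr none (some n) = arr.take n.toNat :=
      PySem.List.slice_to arr (by omega)
    rw [hslice]
    by_cases hmem : X ∈ arr.take n.toNat
    · rw [if_pos ((scan_iff arr n X hpre (by omega)).2 hmem), if_pos ⟨hn, hmem⟩]
      unfold calculatePower
      rw [calcPowLoop_eq 2 (n - 1) 1 (by omega)]
      simp [Int.shiftLeft_eq]
    · rw [if_neg (by
          intro hscan
          exact hmem ((scan_iff arr n X hpre (by omega)).1 hscan)),
        if_neg (by rintro ⟨_, h⟩; exact hmem h)]
  · rw [PySem.List.pyRange_one_eq_nil (by omega)]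
    simp [scanX, hn]
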